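-- pv_equiv track=rewrite | github.com/Gnomebert/pyaqc | RCModules/QAOARC.py | parity_even_p
-- ===== SOURCE A (Python) =====
-- def parity_even_p(state, marked_qubits):
--     """
--     Calculates the parity of elements at indexes in marked_qubits
--
--     Parity is relative to the binary representation of the integer state.
--
--     :param state: The wavefunction index that corresponds to this state.
--     :param marked_qubits: The indexes to be considered in the parity sum.
--
--     :returns: A boolean corresponding to the parity.
--     """
--     assert isinstance(state, int), "{} is not an integer. Must call " \
--                                    "parity_even_p with an integer " \
--                                    "state.".format(state)
--     mask = 0
--     for q in marked_qubits:     # example observable  marked_qubits= [0,2] so mask = 0b101, the binary int that represent a sZ(2) and sZ(0)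
--         mask |= 1 << q          # mask become a binary number |100> would mean q2 is part of the observable
--     # RC convert to a string to count the number of excited qubits common to the ansatz (state) and the observable (marked_aubits)
--     #Ansatz cases: a) 20% of time|101> or b) 80% of time|011>
--     #RC case a) mask & state =  0b101 ie even so returns 0 case b) mask & state = 0b001 ie odd so returns 1
--     # this is the correct outcome from an observable that is an edge
--     return bin(mask & state).count("1") % 2 == 0
-- ===== SOURCE B (Python) =====
-- def parity_even_p(state, marked_qubits):
--     """
--     Calculates the parity of elements at indexes in marked_qubits
--
--     Parity is relative to the binary representation of the integer state.
--     """
--     assert isinstance(state, int), "{} is not an integer. Must call " \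
--                                    "parity_even_p with an integer " \
--                                    "state.".format(state)
--     parity = 0
--     for q in set(marked_qubits):
--         parity ^= (state >> q) & 1
--     return parity == 0
-- ===== Notes on version B (the rewrite author's own statement) =====
-- stated objective: simpler
-- what changed: B keeps a single running parity bit, XOR-ing bit q of state over the deduplicated qubit set, instead of building an OR-mask and popcounting bin(mask & state) via a string pass.
import Mathlib
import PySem

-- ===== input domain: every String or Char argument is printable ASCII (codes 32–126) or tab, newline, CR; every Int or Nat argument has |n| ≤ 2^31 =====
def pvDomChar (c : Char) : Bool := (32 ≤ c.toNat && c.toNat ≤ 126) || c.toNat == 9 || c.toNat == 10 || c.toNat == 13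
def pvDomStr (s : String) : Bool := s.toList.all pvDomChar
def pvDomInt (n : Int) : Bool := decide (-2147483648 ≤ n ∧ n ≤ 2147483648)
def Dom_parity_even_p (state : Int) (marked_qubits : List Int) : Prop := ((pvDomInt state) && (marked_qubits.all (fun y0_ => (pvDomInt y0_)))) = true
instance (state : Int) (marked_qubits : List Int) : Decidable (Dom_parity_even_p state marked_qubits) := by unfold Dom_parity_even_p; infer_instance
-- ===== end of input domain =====

-- B replaces A's mask-building + popcount of bin(mask & state) by a single running
-- parity bit XOR-ed over the deduplicated qubit set (objective: simpler).

-- ===== PORT A =====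
-- bin(x).count("1") counts the '1' digits of |x|, i.e. Python's x.bit_count():
-- ported exactly by the PySem popcount primitive PySem.Int.bitCount.
def parity_even_p (state : Int) (marked_qubits : List Int) : Bool :=
  let mask : Int := marked_qubits.foldl (fun m q => PySem.Int.bor m (@HShiftLeft.hShiftLeft Int Nat Int Int.instHShiftLeftNat 1 q.toNat)) 0
  PySem.Int.bitCount (PySem.Int.band mask state) % 2 == 0

-- ===== PORT B =====
-- XOR is commutative and associative, so the result of B's loop over set(marked_qubits)
-- does not depend on Python's hash order; folding in PySem.Set order is exact.
def parity_even_p_alt (state : Int) (marked_qubits : List Int) : Bool :=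
  ((PySem.Set.ofList marked_qubits).foldl
      (fun p q => PySem.Int.bxor p (PySem.Int.band (@HShiftRight.hShiftRight Int Nat Int Int.instHShiftRightNat state q.toNat) 1)) 0) == 0

-- ===== PRECONDITION & SPEC =====
-- Pre_ excludes only inputs on which A raises: a negative qubit index makes
-- Python's `1 << q` raise ValueError (B's `state >> q` raises there too).
def Pre_parity_even_p (state : Int) (marked_qubits : List Int) : Prop :=
  ∀ q ∈ marked_qubits, 0 ≤ q
instance (state : Int) (marked_qubits : List Int) : Decidable (Pre_parity_even_p state marked_qubits) := by unfold Pre_parity_even_p; infer_instance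

def pvWitness_parity_even_p : Int × List Int := (5, [0, 2])

def Spec_parity_even_p (state : Int) (marked_qubits : List Int) (out : Bool) : Prop := out = parity_even_p_alt state marked_qubits
instance (state : Int) (marked_qubits : List Int) (out : Bool) : Decidable (Spec_parity_even_p state marked_qubits out) := by unfold Spec_parity_even_p; infer_instance

-- ===== CLAIM (what is proved, stated in full; the proofs are below) =====
def Claim_equal_parity_even_p : Prop := ∀ (state : Int) (marked_qubits : List Int), Dom_parity_even_p state marked_qubits → Pre_parity_even_p state marked_qubits → Spec_parity_even_p state marked_qubits (parity_even_p state marked_qubits)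

-- ===== LEMMAS AND PROOFS =====

-- Nat popcount, as computed by A's port
def pvPc (k : Nat) : Nat := PySem.Int.bitCount (k : Int)

theorem pvPc_zero : pvPc 0 = 0 := PySem.Int.bitCount_natCast_zero

theorem pvPc_half {k : Nat} (h : 0 < k) : pvPc k = k % 2 + pvPc (k / 2) :=
  PySem.Int.bitCount_natCast h

theorem pvMod2_or (a b : Nat) : (a ||| b) % 2 = a % 2 ||| b % 2 := by
  have h := @Nat.or_mod_two_pow a b 1
  simpa using h

theorem pvMod2_and (a b : Nat) : (a &&& b) % 2 = a % 2 &&& b % 2 := by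
  have h := @Nat.and_mod_two_pow a b 1
  simpa using h

theorem pvOrAdd (a : Nat) : ∀ b : Nat, a &&& b = 0 → a ||| b = a + b := by
  induction a using Nat.strong_induction_on with
  | _ a IH =>
    intro b h
    rcases Nat.eq_zero_or_pos a with h0 | hpos
    · subst h0; simp
    · have hd : a / 2 &&& b / 2 = 0 := by rw [← Nat.and_div_two, h]
      have ih := IH (a / 2) (Nat.div_lt_self hpos (by omega)) (b / 2) hd
      have hm : a % 2 &&& b % 2 = 0 := by rw [← pvMod2_and, h]
      have e1 : (a ||| b) % 2 = a % 2 ||| b % 2 := pvMod2_or a b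
      have d1 := Nat.div_add_mod (a ||| b) 2
      have d2 := Nat.div_add_mod a 2
      have d3 := Nat.div_add_mod b 2
      rw [Nat.or_div_two, ih] at d1
      have key : (a ||| b) % 2 = a % 2 + b % 2 := by
        rw [e1]
        rcases Nat.mod_two_eq_zero_or_one a with ha | ha <;>
          rcases Nat.mod_two_eq_zero_or_one b with hb | hb <;>
            rw [ha, hb] at hm ⊢ <;> revert hm <;> decide
      omega

theorem pvPcAdd (a : Nat) : ∀ b : Nat, a &&& b = 0 → pvPc (a ||| b) = pvPc a + pvPc b := by
  induction a using Nat.strong_induction_on with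
  | _ a IH =>
    intro b h
    rcases Nat.eq_zero_or_pos a with h0 | hpos
    · subst h0; simp [pvPc_zero]
    rcases Nat.eq_zero_or_pos b with hb0 | hbpos
    · subst hb0; simp [pvPc_zero]
    have hd : a / 2 &&& b / 2 = 0 := by rw [← Nat.and_div_two, h]
    have ih := IH (a / 2) (Nat.div_lt_self hpos (by omega)) (b / 2) hd
    have hm : a % 2 &&& b % 2 = 0 := by rw [← pvMod2_and, h]
    have hab : 0 < (a ||| b) := lt_of_lt_of_le hpos Nat.left_le_or
    rw [pvPc_half hab, pvPc_half hpos, pvPc_half hbpos, Nat.or_div_two, ih, pvMod2_or,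
      pvOrAdd _ _ hm]
    omega

theorem pvPc_pow (q : Nat) : pvPc (2 ^ q) = 1 := by
  induction q with
  | zero => decide
  | succ q ih =>
    have h2 : 0 < 2 ^ (q + 1) := by positivity
    rw [pvPc_half h2, Nat.pow_succ, Nat.mul_mod_left, Nat.mul_div_cancel _ (by omega : 0 < 2), ih]

-- the mask A builds, over Nat
def pvMaskN : List Nat → Nat
  | [] => 0
  | q :: L => (1 <<< q) ||| pvMaskN L

theorem pvTestBit_maskN (L : List Nat) (i : Nat) :
    (pvMaskN L).testBit i = decide (i ∈ L) := by
  induction L with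
  | nil => simp [pvMaskN]
  | cons q L ih =>
    simp [pvMaskN, Nat.testBit_or, ih, Nat.shiftLeft_eq, Nat.testBit_two_pow,
      List.mem_cons, eq_comm]

theorem pvMaskA (xs : List Int) : ∀ m : Nat,
    xs.foldl (fun m q => PySem.Int.bor m (@HShiftLeft.hShiftLeft Int Nat Int Int.instHShiftLeftNat 1 q.toNat)) (m : Int)
      = ((m ||| pvMaskN (xs.map Int.toNat) : Nat) : Int) := by
  induction xs with
  | nil => intro m; simp [pvMaskN]
  | cons q xs ih =>
    intro m
    have h1 : @HShiftLeft.hShiftLeft Int Nat Int Int.instHShiftLeftNat 1 q.toNat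
        = (((1 <<< q.toNat : Nat) : Nat) : Int) := by
      show (1 : Int) <<< q.toNat = _
      rw [Int.shiftLeft_eq, Nat.shiftLeft_eq]
      push_cast
      ring
    simp only [List.foldl_cons, h1, PySem.Int.bor_natCast]
    rw [ih]
    congr 1
    simp [pvMaskN, Nat.or_assoc]

theorem pvMask_dedup (xs : List Int) :
    pvMaskN (xs.map Int.toNat) = pvMaskN ((PySem.Set.ofList xs).map Int.toNat) :=
  Nat.eq_of_testBit_eq fun i => by
    simp [pvTestBit_maskN, List.mem_map, PySem.Set.mem_ofList]

theorem pvSubXor {B x : Nat} (hx : x < 2 ^ B) : 2 ^ B - 1 - x = (2 ^ B - 1) ^^^ x := by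
  have hbit : ∀ i, B ≤ i → x.testBit i = false := fun i hi =>
    Nat.testBit_lt_two_pow (lt_of_lt_of_le hx (Nat.pow_le_pow_right (by omega) hi))
  have hd : x &&& ((2 ^ B - 1) ^^^ x) = 0 := Nat.eq_of_testBit_eq fun i => by
    by_cases hi : i < B
    · simp only [Nat.testBit_and, Nat.testBit_xor, Nat.testBit_two_pow_sub_one, hi,
        decide_true, Nat.zero_testBit]
      cases x.testBit i <;> simp
    · simp [Nat.testBit_and, hbit i (by omega)]
  have ho : x ||| ((2 ^ B - 1) ^^^ x) = 2 ^ B - 1 := Nat.eq_of_testBit_eq fun i => by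
    by_cases hi : i < B
    · simp only [Nat.testBit_or, Nat.testBit_xor, Nat.testBit_two_pow_sub_one, hi, decide_true]
      cases x.testBit i <;> simp
    · simp [Nat.testBit_or, Nat.testBit_xor, Nat.testBit_two_pow_sub_one,
        hbit i (by omega), hi]
  have hadd := pvOrAdd x _ hd
  omega

theorem pvBand_toNat {m B : Nat} (s : Int) (hm : m < 2 ^ B) :
    PySem.Int.band (m : Int) s = ((m &&& (s % ((2 : Int) ^ B)).toNat : Nat) : Int) := by
  have hmb : ∀ i, B ≤ i → m.testBit i = false := fun i hi =>
    Nat.testBit_lt_two_pow (lt_of_lt_of_le hm (Nat.pow_le_pow_right (by omega) hi))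
  rw [PySem.Int.band.eq_1, if_pos (by positivity : (0 : Int) ≤ (m : Int))]
  by_cases hs : (0 : Int) ≤ s
  · rw [if_pos hs]
    obtain ⟨n, rfl⟩ := Int.eq_ofNat_of_zero_le hs
    have hr : ((n : Int) % (2 : Int) ^ B).toNat = n % 2 ^ B := by
      push_cast [← Int.natCast_mod]
      exact Int.toNat_natCast _
    rw [Int.toNat_natCast, hr]
    congr 1
    exact Nat.eq_of_testBit_eq fun i => by
      by_cases hi : i < B
      · simp [Nat.testBit_and, Nat.testBit_mod_two_pow, hi]
      · simp [Nat.testBit_and, hmb i (by omega)]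
  · rw [if_neg hs]
    have hts : ((-s - 1).toNat : Int) = -s - 1 := Int.toNat_of_nonneg (by omega)
    set t := (-s - 1).toNat with ht
    obtain ⟨k, u, hu, htk⟩ : ∃ k u, u < 2 ^ B ∧ t = 2 ^ B * k + u :=
      ⟨t / 2 ^ B, t % 2 ^ B, Nat.mod_lt _ (by positivity), (Nat.div_add_mod t (2 ^ B)).symm⟩
    have hcast : ((2 ^ B - 1 - u : Nat) : Int) = (2 : Int) ^ B - 1 - (u : Int) := by
      have h1 : ((2 ^ B - 1 - u : Nat) : Int) = ((2 ^ B : Nat) : Int) - 1 - (u : Int) := by omega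
      rw [h1]
      push_cast
      ring
    have hsmod : s % (2 : Int) ^ B = ((2 ^ B - 1 - u : Nat) : Int) := by
      have ht2 : (t : Int) = (2 : Int) ^ B * (k : Int) + (u : Int) := by
        have := congrArg (Nat.cast : Nat → Int) htk
        push_cast at this
        exact this
      have hs2 : s = -(t : Int) - 1 := by omega
      have hs1 : s = ((2 ^ B - 1 - u : Nat) : Int) + (2 : Int) ^ B * (-(k : Int) - 1) := by
        rw [hcast, hs2, ht2]
        ring
      rw [hs1, Int.add_mul_emod_self_left, Int.emod_eq_of_lt (by positivity) (by
        rw [hcast]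
        have hu2 : (u : Int) ≥ 0 := by positivity
        omega)]
    rw [hsmod]
    simp only [Int.toNat_natCast]
    congr 1
    rw [pvSubXor hu]
    have hut : ∀ i, i < B → u.testBit i = t.testBit i := fun i hi => by
      have hmod : u = t % 2 ^ B := by rw [htk, Nat.mul_add_mod, Nat.mod_eq_of_lt hu]
      rw [hmod, Nat.testBit_mod_two_pow]
      simp [hi]
    have hrbit : ∀ i, ((2 ^ B - 1) ^^^ u).testBit i = (decide (i < B) && !(t.testBit i)) :=
      fun i => by
        by_cases hi : i < B
        · simp only [Nat.testBit_xor, Nat.testBit_two_pow_sub_one, hi, decide_true, hut i hi]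
          cases t.testBit i <;> simp
        · have h1 : u.testBit i = false :=
            Nat.testBit_lt_two_pow (lt_of_lt_of_le hu (Nat.pow_le_pow_right (by omega) (by omega)))
          simp [Nat.testBit_xor, Nat.testBit_two_pow_sub_one, hi, h1]
    have hdisj : (m &&& t) &&& (m &&& ((2 ^ B - 1) ^^^ u)) = 0 := Nat.eq_of_testBit_eq fun i => by
      simp only [Nat.testBit_and, hrbit i, Nat.zero_testBit]
      cases t.testBit i <;> simp
    have hor : (m &&& t) ||| (m &&& ((2 ^ B - 1) ^^^ u)) = m := Nat.eq_of_testBit_eq fun i => by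
      by_cases hi : i < B
      · simp only [Nat.testBit_or, Nat.testBit_and, hrbit i, hi, decide_true, Bool.true_and]
        cases t.testBit i <;> cases m.testBit i <;> simp
      · simp [Nat.testBit_or, Nat.testBit_and, hmb i (by omega)]
    have hadd := pvOrAdd _ _ hdisj
    rw [hor] at hadd
    have hle : m &&& t ≤ m := Nat.and_le_left
    omega

theorem pvBit (s : Int) (q B : Nat) (hq : q < B) :
    PySem.Int.band (s >>> q) 1
      = ((((s % ((2 : Int) ^ B)).toNat).testBit q).toNat : Int) := by
  rw [PySem.Int.band_one, PySem.Int.mod_eq_emod_of_pos (by omega : (0 : Int) < 2),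
    Int.shiftRight_eq_div_pow, show (((2 ^ q : Nat)) : Int) = (2 : Int) ^ q by push_cast; ring]
  have hB : (0 : Int) < 2 ^ B := by positivity
  have hr0 : 0 ≤ s % (2 : Int) ^ B := Int.emod_nonneg s (by positivity)
  have hrlt : s % (2 : Int) ^ B < 2 ^ B := Int.emod_lt_of_pos s hB
  set r : Int := s % (2 : Int) ^ B with hrdef
  have hs : (2 : Int) ^ B * (s / 2 ^ B) + r = s := Int.mul_ediv_add_emod s (2 ^ B)
  have h2q : ((2 : Int) ^ q) ≠ 0 := by positivity
  have hdiv : s / (2 : Int) ^ q = (2 : Int) ^ (B - q) * (s / 2 ^ B) + r / 2 ^ q := by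
    have hpow : (2 : Int) ^ B = 2 ^ q * 2 ^ (B - q) := by
      rw [← pow_add]; congr 1; omega
    conv_lhs => rw [← hs]
    rw [hpow, show (2 : Int) ^ q * 2 ^ (B - q) * (s / (2 ^ q * 2 ^ (B - q))) + r
        = r + (2 : Int) ^ q * (2 ^ (B - q) * (s / (2 ^ q * 2 ^ (B - q)))) by ring]
    rw [Int.add_mul_ediv_left _ _ h2q]
    ring
  rw [hdiv]
  obtain ⟨c, hc⟩ : ∃ c, B - q = c + 1 := ⟨B - q - 1, by omega⟩
  have hbq : (2 : Int) ^ (B - q) * (s / 2 ^ B) = 2 * (2 ^ c * (s / 2 ^ B)) := by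
    rw [hc, pow_succ]
    ring
  rw [hbq, add_comm, Int.add_mul_emod_self_left]
  rw [show r = ((r.toNat : Nat) : Int) from (Int.toNat_of_nonneg hr0).symm]
  rw [show ((r.toNat : Nat) : Int) / (2 : Int) ^ q = ((r.toNat / 2 ^ q : Nat) : Int) by
    rw [Int.natCast_ediv]; push_cast; ring]
  rw [show ((r.toNat / 2 ^ q : Nat) : Int) % 2 = ((r.toNat / 2 ^ q % 2 : Nat) : Int) by
    push_cast [← Int.natCast_mod]; ring]
  rw [Int.toNat_natCast, Nat.testBit_eq_decide_div_mod_eq]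
  rcases Nat.mod_two_eq_zero_or_one (r.toNat / 2 ^ q) with h | h <;> simp [h]

theorem pvBitAddMod (b x : Nat) (hb : b ≤ 1) : (b + x) % 2 = b ^^^ x % 2 := by
  rcases Nat.mod_two_eq_zero_or_one x with h | h <;> interval_cases b <;>
    rw [h] <;> simp [Nat.add_mod, h]

-- B's running parity, over Nat
def pvXorN (n' : Nat) : List Nat → Nat
  | [] => 0
  | q :: L => (n'.testBit q).toNat ^^^ pvXorN n' L

theorem pvMain (n' : Nat) (D : List Nat) (hD : D.Nodup) :
    pvPc (pvMaskN D &&& n') % 2 = pvXorN n' D := by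
  induction D with
  | nil => simp [pvMaskN, pvXorN, pvPc_zero]
  | cons q L ih =>
    obtain ⟨hq, hL⟩ := List.nodup_cons.mp hD
    have hsplit : pvMaskN (q :: L) &&& n' = ((1 <<< q) &&& n') ||| (pvMaskN L &&& n') := by
      simp [pvMaskN, Nat.and_or_distrib_right]
    have hdisj : ((1 <<< q) &&& n') &&& (pvMaskN L &&& n') = 0 := Nat.eq_of_testBit_eq fun i => by
      by_cases hiq : q = i
      · subst hiq
        simp [Nat.testBit_and, pvTestBit_maskN, hq]
      · simp [Nat.testBit_and, Nat.shiftLeft_eq, hiq]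
    have hpow : pvPc ((1 <<< q) &&& n') = (n'.testBit q).toNat := by
      have hone : (1 <<< q) &&& n' = if n'.testBit q then 2 ^ q else 0 :=
        Nat.eq_of_testBit_eq fun i => by
          by_cases hiq : q = i
          · subst hiq
            cases h : n'.testBit q <;>
              simp [Nat.shiftLeft_eq, Nat.testBit_and, h]
          · cases h : n'.testBit q <;>
              simp [Nat.shiftLeft_eq, Nat.testBit_and, Nat.testBit_two_pow, hiq, h]
      rw [hone]
      cases h : n'.testBit q <;> simp [pvPc_zero, pvPc_pow]
    rw [hsplit, pvPcAdd _ _ hdisj, hpow]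
    have hih := ih hL
    show ((n'.testBit q).toNat + pvPc (pvMaskN L &&& n')) % 2 = pvXorN n' (q :: L)
    rw [pvXorN, ← hih]
    exact pvBitAddMod _ _ (by cases n'.testBit q <;> simp)

theorem pvFoldB (s : Int) (B : Nat) (L : List Int) (hB : ∀ q ∈ L, q.toNat < B) :
    ∀ p : Nat,
      L.foldl (fun p q => PySem.Int.bxor p (PySem.Int.band (@HShiftRight.hShiftRight Int Nat Int Int.instHShiftRightNat s q.toNat) 1)) (p : Int)
        = (((L.map Int.toNat).foldl
            (fun p q => p ^^^ (((s % ((2 : Int) ^ B)).toNat).testBit q).toNat) p : Nat) : Int) := by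
  induction L with
  | nil => intro p; simp
  | cons q L ih =>
    intro p
    simp only [List.foldl_cons, List.map_cons]
    rw [pvBit s q.toNat B (hB q List.mem_cons_self), PySem.Int.bxor_natCast]
    exact ih (fun x hx => hB x (List.mem_cons_of_mem q hx)) _

theorem pvFoldXor (n' : Nat) (L : List Nat) :
    ∀ p : Nat, L.foldl (fun p q => p ^^^ (n'.testBit q).toNat) p = p ^^^ pvXorN n' L := by
  induction L with
  | nil => intro p; simp [pvXorN]
  | cons q L ih =>
    intro p
    simp only [List.foldl_cons, pvXorN]
    rw [ih, Nat.xor_assoc]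

theorem pvLeFoldMax (L : List Nat) : ∀ i ∈ L, i ≤ L.foldr max 0 := by
  induction L with
  | nil => intro i hi; cases hi
  | cons q L ih =>
    intro i hi
    rcases List.mem_cons.mp hi with rfl | hi
    · simp [List.foldr_cons]
    · exact le_trans (ih i hi) (by simp [List.foldr_cons])

-- ===== VERDICT (by name: the statement is the Claim_ definition above) =====
theorem parity_even_p_spec : Claim_equal_parity_even_p := by
  unfold Claim_equal_parity_even_p
  intro s xs _ hpre
  unfold Spec_parity_even_p parity_even_p parity_even_p_alt Pre_parity_even_p at *
  simp only []
  set DN : List Nat := (PySem.Set.ofList xs).map Int.toNat with hDN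
  set B : Nat := DN.foldr max 0 + 1 with hBdef
  have hqB : ∀ i ∈ DN, i < B := fun i hi => by
    have := pvLeFoldMax DN i hi
    omega
  have hNodup : DN.Nodup := by
    refine List.Nodup.map_on ?_ (PySem.Set.nodup_ofList xs)
    intro x hx y hy hxy
    have hx0 : 0 ≤ x := hpre x ((PySem.Set.mem_ofList xs x).mp hx)
    have hy0 : 0 ≤ y := hpre y ((PySem.Set.mem_ofList xs y).mp hy)
    omega
  have hmask_lt : pvMaskN DN < 2 ^ B := by
    apply Nat.lt_pow_two_of_testBit
    intro i hi
    rw [pvTestBit_maskN]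
    simp only [decide_eq_false_iff_not]
    intro hmem
    exact absurd (hqB i hmem) (by omega)
  set n' : Nat := (s % ((2 : Int) ^ B)).toNat with hn'
  -- A side
  have hA0 : (0 : Int) = ((0 : Nat) : Int) := by norm_num
  have hmask := pvMaskA xs 0
  rw [hA0, hmask, Nat.zero_or, pvMask_dedup xs, ← hDN, pvBand_toNat s hmask_lt, ← hn']
  have hAcount : PySem.Int.bitCount ((pvMaskN DN &&& n' : Nat) : Int) = pvPc (pvMaskN DN &&& n') := rfl
  rw [hAcount]
  -- B side
  have hBfold := pvFoldB s B (PySem.Set.ofList xs)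
    (fun q hq => hqB q.toNat (List.mem_map_of_mem hq)) 0
  rw [hBfold, ← hDN, ← hn', pvFoldXor, Nat.zero_xor]
  rw [pvMain n' DN hNodup]
  by_cases hz : pvXorN n' DN = 0
  · simp [hz]
  · simp [hz]
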